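-- pv_equiv track=rewrite | github.com/Sarhanstan/gui-conf | polygarm.py | mSize
-- ===== SOURCE A (Python) =====
-- def crossroad(i,j,pw):
--     nc=i+j-pw+1
--     res=0
--     if nc:
--         res=(nc*nc+nc)//2
--     return res
--
-- def mSize(n,pw):
--     npar=pw*pw+(pw+1)*(pw+1)
--
--     res=(n-2*pw)*(n-2*pw)*npar
--
--     for i in range(pw):
--         res+=4*((npar-i*i-2*i-1)*(n-2*pw))
--
--         for j in range(pw):
--             res+=4*((npar-i*i-2*i-1)-j*j-2*j-1+crossroad(i,j,pw))
--
--     return res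
-- ===== SOURCE B (Python) =====
-- def mSize(n, pw):
--     npar = pw * pw + (pw + 1) * (pw + 1)
--     m = n - 2 * pw
--     if pw <= 0:
--         return m * m * npar
--     # power sums: S1 = 1^2+...+pw^2, S2 = 1^2+...+(pw-1)^2, S3 = 1^3+...+(pw-1)^3
--     S1 = pw * (pw + 1) * (2 * pw + 1) // 6
--     S2 = (pw - 1) * pw * (2 * pw - 1) // 6
--     S3 = ((pw - 1) * pw // 2) ** 2
--     cross = pw * S2 - S3  # sum of crossroad over the pw x pw grid
--     return (m * m * npar
--             + 4 * m * (pw * npar - S1)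
--             + 4 * (pw * pw * npar - 2 * pw * S1)
--             + 4 * cross)
-- ===== Notes on version B (the rewrite author's own statement) =====
-- stated objective: faster
-- what changed: Replaced the nested pw*pw accumulation loop by a closed-form O(1) formula using the power sums Si, Si^2, Si^3 (the crossroad triangular terms collapse to pw*S2 - S3 via nc(nc+1)/2 grouped over diagonals).
import Mathlib
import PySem

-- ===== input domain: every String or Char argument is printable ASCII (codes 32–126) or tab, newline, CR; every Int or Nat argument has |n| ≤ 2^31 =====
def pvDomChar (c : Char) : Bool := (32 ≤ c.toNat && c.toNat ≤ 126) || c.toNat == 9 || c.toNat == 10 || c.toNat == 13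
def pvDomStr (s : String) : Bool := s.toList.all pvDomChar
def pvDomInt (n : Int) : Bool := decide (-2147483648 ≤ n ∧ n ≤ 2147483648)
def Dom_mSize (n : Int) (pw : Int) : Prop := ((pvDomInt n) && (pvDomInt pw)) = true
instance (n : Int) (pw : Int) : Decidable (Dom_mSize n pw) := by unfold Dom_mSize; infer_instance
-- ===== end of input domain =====

-- B replaces A's nested O(pw^2) accumulation loop by a closed-form O(1) formula built from
-- the power sums Σi, Σi² (the crossroad terms collapse to pw·Σi² − (Σi)²); objective: faster.


-- ===== PORT A =====
def crossroad (i : Int) (j : Int) (pw : Int) : Int :=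
  let nc := i + j - pw + 1
  let res : Int := 0
  let res := if nc ≠ 0 then PySem.Int.floordiv (nc * nc + nc) 2 else res
  res

def mSize (n : Int) (pw : Int) : Int :=
  let npar := pw * pw + (pw + 1) * (pw + 1)
  let res := (n - 2 * pw) * (n - 2 * pw) * npar
  (PySem.List.pyRange 0 pw 1).foldl
    (fun res i =>
      (PySem.List.pyRange 0 pw 1).foldl
        (fun res j =>
          res + 4 * ((npar - i * i - 2 * i - 1) - j * j - 2 * j - 1 + crossroad i j pw))
        (res + 4 * ((npar - i * i - 2 * i - 1) * (n - 2 * pw))))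
    res

-- ===== PORT B =====
def mSize_alt (n : Int) (pw : Int) : Int :=
  let npar := pw * pw + (pw + 1) * (pw + 1)
  let m := n - 2 * pw
  if pw ≤ 0 then m * m * npar
  else
    let s1 := PySem.Int.floordiv (pw * (pw + 1) * (2 * pw + 1)) 6
    let s2 := PySem.Int.floordiv ((pw - 1) * pw * (2 * pw - 1)) 6
    let s3 := (PySem.Int.floordiv ((pw - 1) * pw) 2) ^ 2
    let cross := pw * s2 - s3
    m * m * npar + 4 * m * (pw * npar - s1) + 4 * (pw * pw * npar - 2 * pw * s1) + 4 * cross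

-- ===== PRECONDITION & SPEC =====
def Spec_mSize (n : Int) (pw : Int) (out : Int) : Prop := out = mSize_alt n pw
instance (n : Int) (pw : Int) (out : Int) : Decidable (Spec_mSize n pw out) := by
  unfold Spec_mSize; infer_instance

-- ===== CLAIM (what is proved, stated in full; the proofs are below) =====
def Claim_equal_mSize : Prop := ∀ (n : Int) (pw : Int), Dom_mSize n pw → Spec_mSize n pw (mSize n pw)

-- ===== LEMMAS AND PROOFS =====

/-- Σ_{i<P} i over `Finset.range`, as an integer. -/
def pvSI (P : Nat) : Int := ∑ i ∈ Finset.range P, (i : Int)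

/-- Σ_{i<P} i² over `Finset.range`, as an integer. -/
def pvSQ (P : Nat) : Int := ∑ i ∈ Finset.range P, (i : Int) ^ 2

lemma pvSI_eq (P : Nat) : 2 * pvSI P = P * (P - 1) := by
  induction P with
  | zero => simp [pvSI]
  | succ p ih =>
      rw [pvSI, Finset.sum_range_succ, ← pvSI]
      push_cast
      linear_combination ih

lemma pvSQ_eq (P : Nat) : 6 * pvSQ P = P * (P - 1) * (2 * P - 1) := by
  induction P with
  | zero => simp [pvSQ]
  | succ p ih =>
      rw [pvSQ, Finset.sum_range_succ, ← pvSQ]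
      push_cast
      linear_combination ih

/-- Sum of a quadratic polynomial over `range P`, in terms of the power sums. -/
lemma pv_sum_quad (P : Nat) (a b c : Int) :
    ∑ j ∈ Finset.range P, (a + b * (j : Int) + c * (j : Int) ^ 2)
      = P * a + b * pvSI P + c * pvSQ P := by
  induction P with
  | zero => simp [pvSI, pvSQ]
  | succ p ih =>
      have h1 : pvSI (p + 1) = pvSI p + p := by
        rw [pvSI, Finset.sum_range_succ, ← pvSI]
      have h2 : pvSQ (p + 1) = pvSQ p + (p : Int) ^ 2 := by
        rw [pvSQ, Finset.sum_range_succ, ← pvSQ]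
      rw [Finset.sum_range_succ, ih, h1, h2]
      push_cast
      ring

/-- `crossroad` computes the triangular number nc(nc+1)/2 exactly (the division is exact). -/
lemma pv_two_cross (i j pw : Int) :
    2 * crossroad i j pw = (i + j - pw + 1) * (i + j - pw + 1) + (i + j - pw + 1) := by
  show 2 * (if i + j - pw + 1 ≠ 0 then
      PySem.Int.floordiv ((i + j - pw + 1) * (i + j - pw + 1) + (i + j - pw + 1)) 2
    else 0) = _
  set nc := i + j - pw + 1 with hnc
  rcases Int.even_mul_succ_self nc with ⟨t, ht⟩
  have hval : nc * nc + nc = 2 * t := by linear_combination ht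
  by_cases h : nc = 0
  · simp [h]
  · rw [if_pos h, hval,
      show PySem.Int.floordiv (2 * t) 2 = t from by
        rw [PySem.Int.floordiv_eq_iff_of_pos (by norm_num)]; omega]

/-- The exact shape of A's double loop: a fold of additions is the initial value plus a sum. -/
lemma pv_foldl2 (l1 l2 : List Int) (A : Int → Int) (g : Int → Int → Int) (a : Int) :
    l1.foldl (fun r x => l2.foldl (fun r y => r + g x y) (r + A x)) a
      = a + (l1.map (fun x => A x + (l2.map (g x)).sum)).sum := by
  induction l1 generalizing a with
  | nil => simp
  | cons x t ih =>
      rw [List.foldl_cons, ih, PySem.List.foldl_add, List.map_cons, List.sum_cons]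
      ring

/-- Bridge: a mapped sum over `pyRange 0 P 1` is a `Finset.range` sum. -/
lemma pv_sum_map_pyRange (P : Nat) (f : Int → Int) :
    ((PySem.List.pyRange 0 (P : Int) 1).map f).sum = ∑ k ∈ Finset.range P, f (k : Int) := by
  induction P with
  | zero => simp [PySem.List.pyRange_one_eq_nil]
  | succ p ih =>
      rw [show ((p + 1 : Nat) : Int) = (p : Int) + 1 by push_cast; ring,
        PySem.List.pyRange_one_succ_right (by positivity), List.map_append,
        List.sum_append, ih, Finset.sum_range_succ]
      simp

/-- Closed form of A's value at a nonnegative width, in terms of the power sums. -/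
lemma pv_mSize_closed (n : Int) (P : Nat) :
    2 * mSize n (P : Int) =
      2 * n ^ 2 - 8 * P * n + 4 * P * n ^ 2 + 8 * (P : Int) ^ 2 + 4 * (P : Int) ^ 2 * n ^ 2
        - 12 * (P : Int) ^ 3 + 4 * (P : Int) ^ 4
        - 8 * pvSQ P * n + 8 * pvSQ P * P
        - 16 * pvSI P * n + 24 * pvSI P * P - 16 * pvSI P * (P : Int) ^ 2
        + 8 * pvSI P ^ 2 := by
  have hA : mSize n (P : Int)
      = (n - 2 * P) * (n - 2 * P) * ((P : Int) * P + (P + 1) * (P + 1))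
        + ∑ i ∈ Finset.range P,
            (4 * ((((P : Int) * P + (P + 1) * (P + 1)) - i * i - 2 * i - 1) * (n - 2 * P))
              + ∑ j ∈ Finset.range P,
                  4 * ((((P : Int) * P + (P + 1) * (P + 1)) - i * i - 2 * i - 1)
                        - j * j - 2 * j - 1 + crossroad i j P)) := by
    show (PySem.List.pyRange 0 (P : Int) 1).foldl _ _ = _
    rw [pv_foldl2, pv_sum_map_pyRange]
    congr 1
    refine Finset.sum_congr rfl fun i _ => ?_
    rw [pv_sum_map_pyRange]
  have hinner : ∀ i : Int,
      ∑ j ∈ Finset.range P,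
          (2 * (4 * ((((P : Int) * P + (P + 1) * (P + 1)) - i * i - 2 * i - 1)
                      - (j : Int) * j - 2 * j - 1 + crossroad i j P)))
        = (P : Int) * (20 * (P : Int) ^ 2 + 4 * P - 4 * i - 4 * i ^ 2 - 8 * P * i)
          + (-4 + 8 * i - 8 * P) * pvSI P + (-4) * pvSQ P := by
    intro i
    rw [← pv_sum_quad P (20 * (P : Int) ^ 2 + 4 * P - 4 * i - 4 * i ^ 2 - 8 * P * i)
        (-4 + 8 * i - 8 * P) (-4)]
    refine Finset.sum_congr rfl fun j _ => ?_
    linear_combination (4 : Int) * pv_two_cross i (j : Int) (P : Int)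
  have hstep : ∀ i : Int,
      2 * (4 * ((((P : Int) * P + (P + 1) * (P + 1)) - i * i - 2 * i - 1) * (n - 2 * P))
            + ∑ j ∈ Finset.range P,
                4 * ((((P : Int) * P + (P + 1) * (P + 1)) - i * i - 2 * i - 1)
                      - (j : Int) * j - 2 * j - 1 + crossroad i j P))
        = (16 * (P : Int) * n - 28 * (P : Int) ^ 2 + 16 * (P : Int) ^ 2 * n
              - 12 * (P : Int) ^ 3 - 4 * pvSQ P - 4 * pvSI P - 8 * pvSI P * P)
          + (-16 * n + 28 * (P : Int) - 8 * (P : Int) ^ 2 + 8 * pvSI P) * i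
          + (-8 * n + 12 * (P : Int)) * i ^ 2 := by
    intro i
    rw [mul_add, Finset.mul_sum, hinner i]
    ring
  have hsum :
      ∑ i ∈ Finset.range P,
          (2 * (4 * ((((P : Int) * P + (P + 1) * (P + 1)) - (i : Int) * i - 2 * i - 1) * (n - 2 * P))
            + ∑ j ∈ Finset.range P,
                4 * ((((P : Int) * P + (P + 1) * (P + 1)) - (i : Int) * i - 2 * i - 1)
                      - (j : Int) * j - 2 * j - 1 + crossroad i j P)))
        = ∑ i ∈ Finset.range P,
            ((16 * (P : Int) * n - 28 * (P : Int) ^ 2 + 16 * (P : Int) ^ 2 * n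
                - 12 * (P : Int) ^ 3 - 4 * pvSQ P - 4 * pvSI P - 8 * pvSI P * P)
              + (-16 * n + 28 * (P : Int) - 8 * (P : Int) ^ 2 + 8 * pvSI P) * (i : Int)
              + (-8 * n + 12 * (P : Int)) * (i : Int) ^ 2) :=
    Finset.sum_congr rfl fun i _ => hstep (i : Int)
  rw [hA, mul_add, Finset.mul_sum, hsum, pv_sum_quad]
  ring

/-- Closed form of B's value at a positive width: the three exact divisions evaluate to power sums. -/
lemma pv_alt_closed (n : Int) (P : Nat) (hP : 0 < P) :
    mSize_alt n (P : Int) =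
      (n - 2 * P) * (n - 2 * P) * ((P : Int) * P + (P + 1) * (P + 1))
        + 4 * (n - 2 * P) * ((P : Int) * ((P : Int) * P + (P + 1) * (P + 1)) - (pvSQ P + (P : Int) ^ 2))
        + 4 * ((P : Int) ^ 2 * ((P : Int) * P + (P + 1) * (P + 1)) - 2 * P * (pvSQ P + (P : Int) ^ 2))
        + 4 * ((P : Int) * pvSQ P - pvSI P ^ 2) := by
  have hpos : ¬ ((P : Int) ≤ 0) := by exact_mod_cast not_le.mpr (by exact_mod_cast hP)
  have hQ1 : (P : Int) * (P + 1) * (2 * P + 1) = 6 * (pvSQ P + (P : Int) ^ 2) := by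
    have h1 := pvSQ_eq (P + 1)
    have h2 : pvSQ (P + 1) = pvSQ P + (P : Int) ^ 2 := by
      rw [pvSQ, Finset.sum_range_succ, ← pvSQ]
    push_cast at h1
    linear_combination 6 * h2 - h1
  have hQ2 : ((P : Int) - 1) * P * (2 * P - 1) = 6 * pvSQ P := by
    linear_combination -pvSQ_eq P
  have hS : ((P : Int) - 1) * P = 2 * pvSI P := by
    linear_combination -pvSI_eq P
  show (if (P : Int) ≤ 0 then _ else _) = _
  rw [if_neg hpos, hQ1, hQ2, hS,
    show PySem.Int.floordiv (6 * (pvSQ P + (P : Int) ^ 2)) 6 = pvSQ P + (P : Int) ^ 2 from by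
      rw [PySem.Int.floordiv_eq_iff_of_pos (by norm_num)]; omega,
    show PySem.Int.floordiv (6 * pvSQ P) 6 = pvSQ P from by
      rw [PySem.Int.floordiv_eq_iff_of_pos (by norm_num)]; omega,
    show PySem.Int.floordiv (2 * pvSI P) 2 = pvSI P from by
      rw [PySem.Int.floordiv_eq_iff_of_pos (by norm_num)]; omega]
  ring

-- ===== VERDICT (by name: the statement is the Claim_ definition above) =====
theorem mSize_spec : Claim_equal_mSize := by
  intro n pw _
  show mSize n pw = mSize_alt n pw
  by_cases hpw : pw ≤ 0
  · show (PySem.List.pyRange 0 pw 1).foldl _ _ = _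
    rw [PySem.List.pyRange_one_eq_nil hpw, List.foldl_nil]
    show _ = (if pw ≤ 0 then _ else _)
    rw [if_pos hpw]
  · obtain ⟨P, rfl⟩ : ∃ P : Nat, pw = (P : Int) := ⟨pw.toNat, by omega⟩
    have hP : 0 < P := by exact_mod_cast lt_of_not_ge (by exact_mod_cast hpw)
    have h2 : 2 * mSize n (P : Int) = 2 * mSize_alt n (P : Int) := by
      rw [pv_mSize_closed n P, pv_alt_closed n P hP]
      linear_combination (8 * pvSI P - 8 * n + 8 * (P : Int) - 4 * (P : Int) ^ 2) * pvSI_eq P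
    linarith
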